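-- pv_equiv track=rewrite | github.com/ZhigangHe-hust/CACOP | PlantCount_GeCo/generate_coco_annotations.py | convert_box_to_xywh
-- ===== SOURCE A (Python) =====
-- def convert_box_to_xywh(box_points):
--     # box_points是一个包含4个点坐标的列表，每个点是一个[x,y]坐标
--     # 转换为[x,y,width,height]格式
--     x_coords = [point[0] for point in box_points]
--     y_coords = [point[1] for point in box_points]
--
--     x = min(x_coords)
--     y = min(y_coords)
--     width = max(x_coords) - x
--     height = max(y_coords) - y
--
--     return [x, y, width, height]
-- ===== SOURCE B (Python) =====
-- def convert_box_to_xywh(box_points):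
--     # Single fused pass: track the four extremes while walking the points once.
--     min_x = box_points[0][0]
--     min_y = box_points[0][1]
--     max_x = min_x
--     max_y = min_y
--     for p in box_points[1:]:
--         px = p[0]
--         py = p[1]
--         if px < min_x:
--             min_x = px
--         if px > max_x:
--             max_x = px
--         if py < min_y:
--             min_y = py
--         if py > max_y:
--             max_y = py
--     return [min_x, min_y, max_x - min_x, max_y - min_y]
-- ===== Notes on version B (the rewrite author's own statement) =====
-- stated objective: alternative
-- what changed: Replaces the two list comprehensions plus four separate min/max scans (six passes over the points) with one explicit loop seeded from the first point that maintains min_x/min_y/max_x/max_y in a single pass.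
import Mathlib
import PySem

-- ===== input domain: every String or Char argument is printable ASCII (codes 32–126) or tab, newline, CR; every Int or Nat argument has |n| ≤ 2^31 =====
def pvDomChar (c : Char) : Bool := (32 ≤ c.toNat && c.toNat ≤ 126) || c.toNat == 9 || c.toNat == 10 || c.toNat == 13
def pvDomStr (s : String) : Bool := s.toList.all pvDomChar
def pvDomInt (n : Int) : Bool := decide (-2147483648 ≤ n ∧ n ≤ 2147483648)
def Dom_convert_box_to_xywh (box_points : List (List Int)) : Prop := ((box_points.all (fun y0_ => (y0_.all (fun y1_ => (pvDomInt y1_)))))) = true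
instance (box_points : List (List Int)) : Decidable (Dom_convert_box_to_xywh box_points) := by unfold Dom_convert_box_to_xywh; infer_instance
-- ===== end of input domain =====

-- B fuses A's two comprehensions and four min/max scans into one explicit loop over the points.


-- ===== PORT A =====
-- point[0] / point[1] as pyGetD (total form; Pre_ guarantees each point has ≥ 2 coordinates),
-- min(...)/max(...) as PySem.List.min?/max? with identity key (Pre_ guarantees nonemptiness).
def convert_box_to_xywh (box_points : List (List Int)) : List Int :=
  let x_coords := box_points.map (fun point => PySem.List.pyGetD point 0 0)
  let y_coords := box_points.map (fun point => PySem.List.pyGetD point 1 0)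
  let x := (PySem.List.min? x_coords (fun v => v)).getD 0
  let y := (PySem.List.min? y_coords (fun v => v)).getD 0
  let width := (PySem.List.max? x_coords (fun v => v)).getD 0 - x
  let height := (PySem.List.max? y_coords (fun v => v)).getD 0 - y
  [x, y, width, height]

-- ===== PORT B =====
-- loop body of Source B: update the four extremes from one point (state = (min_x, min_y, max_x, max_y))
def pvAltStep (st : Int × Int × Int × Int) (p : List Int) : Int × Int × Int × Int :=
  let px := PySem.List.pyGetD p 0 0
  let py := PySem.List.pyGetD p 1 0
  let min_x := if px < st.1 then px else st.1
  let max_x := if px > st.2.2.1 then px else st.2.2.1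
  let min_y := if py < st.2.1 then py else st.2.1
  let max_y := if py > st.2.2.2 then py else st.2.2.2
  (min_x, min_y, max_x, max_y)

def convert_box_to_xywh_alt (box_points : List (List Int)) : List Int :=
  match box_points with
  | [] => []   -- Python B raises IndexError here (outside Pre_)
  | p :: rest =>
    let x0 := PySem.List.pyGetD p 0 0
    let y0 := PySem.List.pyGetD p 1 0
    let st := rest.foldl pvAltStep (x0, y0, x0, y0)
    [st.1, st.2.1, st.2.2.1 - st.1, st.2.2.2 - st.2.1]

-- ===== PRECONDITION & SPEC =====
-- Pre_ excludes exactly the inputs where Python A raises: the empty list (min of empty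
-- sequence, ValueError) and any point with fewer than 2 coordinates (IndexError).
def Pre_convert_box_to_xywh (box_points : List (List Int)) : Prop :=
  box_points ≠ [] ∧ ∀ p ∈ box_points, 2 ≤ p.length
instance (box_points : List (List Int)) : Decidable (Pre_convert_box_to_xywh box_points) := by
  unfold Pre_convert_box_to_xywh; infer_instance
def pvWitness_convert_box_to_xywh : List (List Int) := [[1, 2], [3, 0], [2, 5]]

def Spec_convert_box_to_xywh (box_points : List (List Int)) (out : List Int) : Prop := out = convert_box_to_xywh_alt box_points
instance (box_points : List (List Int)) (out : List Int) : Decidable (Spec_convert_box_to_xywh box_points out) := by unfold Spec_convert_box_to_xywh; infer_instance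

-- ===== CLAIM (what is proved, stated in full; the proofs are below) =====
def Claim_equal_convert_box_to_xywh : Prop := ∀ (box_points : List (List Int)), Dom_convert_box_to_xywh box_points → Pre_convert_box_to_xywh box_points → Spec_convert_box_to_xywh box_points (convert_box_to_xywh box_points)

-- ===== LEMMAS AND PROOFS =====

-- B's fused loop computes the four running extrema of the projected coordinates.
theorem pvAltLoop_eq (rest : List (List Int)) (a b c d : Int) :
    rest.foldl pvAltStep (a, b, c, d) =
      ((rest.map (fun p => PySem.List.pyGetD p 0 0)).foldl min a,
       (rest.map (fun p => PySem.List.pyGetD p 1 0)).foldl min b,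
       (rest.map (fun p => PySem.List.pyGetD p 0 0)).foldl max c,
       (rest.map (fun p => PySem.List.pyGetD p 1 0)).foldl max d) := by
  induction rest generalizing a b c d with
  | nil => rfl
  | cons p t ih =>
    simp only [List.foldl_cons, List.map_cons, pvAltStep]
    rw [ih]
    simp only [show ∀ (x y : Int), (if x < y then x else y) = min y x from fun x y => by omega,
               show ∀ (x y : Int), (if x > y then x else y) = max y x from fun x y => by omega]

theorem convert_box_to_xywh_spec : Claim_equal_convert_box_to_xywh := by
  intro box_points _ hpre
  unfold Spec_convert_box_to_xywh
  obtain ⟨hne, _⟩ := hpre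
  match box_points with
  | [] => exact absurd rfl hne
  | p :: rest =>
    simp only [convert_box_to_xywh, convert_box_to_xywh_alt, List.map_cons,
      PySem.List.min?_id_cons, PySem.List.max?_id_cons, Option.getD_some,
      pvAltLoop_eq]
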